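-- pv_equiv track=rewrite | github.com/Michal0ss/ASD | DynamicAlg/classes/tank_fuel.py | min_refuels
-- ===== SOURCE A (Python) =====
-- def next_station_search(S, left, right, val):
--     while left <= right:
--         mid = (left + right) // 2
--         if val < S[mid]:
--             right = mid - 1
--         else:
--             left = mid + 1
--     return right
--
-- def min_refuels(stations, L, destination, fuel):
--
--     n = len(stations)
--
--     firstStation = next_station_search(stations, 0, n - 1, fuel)
--     lastStation = next_station_search(stations, 0, n-1, destination)
--
--     if stations[0] > fuel: return -1
--     if fuel >= destination: return 0
--
--     counter = 0
--     position = firstStation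
--
--     while position<lastStation:
--         counter += 1
--         nextStop = next_station_search(stations, position + 1, lastStation, stations[position] + L)
--
--         if nextStop == position:
--             return -1
--         position = nextStop
--
--     return counter if destination - stations[lastStation] <= L else -1
-- ===== SOURCE B (Python) =====
-- def min_refuels(stations, L, destination, fuel):
--     if stations[0] > fuel:
--         return -1
--     if fuel >= destination:
--         return 0
--     n = len(stations)
--     last = n - 1
--     while last >= 0 and stations[last] > destination:
--         last -= 1
--     if destination - stations[last] > L:
--         return -1
--     i = 0
--     while i + 1 <= n - 1 and stations[i + 1] <= fuel:
--         i += 1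
--     count = 0
--     while i < last:
--         j = i
--         while j + 1 <= last and stations[j + 1] <= stations[i] + L:
--             j += 1
--         if j == i:
--             return -1
--         count += 1
--         i = j
--     return count
-- ===== Notes on version B (the rewrite author's own statement) =====
-- stated objective: alternative
-- what changed: A finds each greedy jump with a fresh binary search (next_station_search) per refuel; B makes one two-pointer linear forward pass (plus a single downward scan for the last in-range station), exploiting that the farthest reachable station is monotone, and rejects an out-of-range destination before looping; fewer comparisons asymptotically but not measured faster under CPython.
-- outside the precondition, e.g. on min_refuels([0, 2, 16, -5], 2, 3, 2): A returns 0, B returns -1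
import Mathlib
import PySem

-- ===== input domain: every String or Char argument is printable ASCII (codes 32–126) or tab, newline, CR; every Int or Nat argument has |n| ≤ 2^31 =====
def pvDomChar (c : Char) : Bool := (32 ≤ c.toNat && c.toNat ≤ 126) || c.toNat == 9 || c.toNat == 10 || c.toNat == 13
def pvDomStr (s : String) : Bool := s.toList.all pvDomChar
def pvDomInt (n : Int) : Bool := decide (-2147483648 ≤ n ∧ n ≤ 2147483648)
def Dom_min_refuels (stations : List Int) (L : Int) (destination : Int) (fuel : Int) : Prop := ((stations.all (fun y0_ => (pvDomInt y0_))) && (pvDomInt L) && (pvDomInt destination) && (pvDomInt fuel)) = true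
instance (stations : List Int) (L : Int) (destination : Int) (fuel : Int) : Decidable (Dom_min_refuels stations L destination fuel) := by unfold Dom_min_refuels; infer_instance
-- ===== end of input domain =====

-- B replaces A's per-jump binary searches by a single two-pointer linear forward pass; return-value equivalence proved on nonempty sorted station lists (and guard-decided ones).
-- Every while-loop is transcribed as structural recursion on a Nat fuel equal to the loop's exact measure (a totality guard only; each step consumes at least one unit).

-- ===== PORT A =====
-- literal port of next_station_search; S[mid] is in range on every call A makes inside Pre_ (default 0 otherwise);
-- fuel = right + 1 - left, an upper bound on the number of iterations
def next_station_search_go (S : List Int) (val : Int) : Nat → Int → Int → Int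
  | 0, _, right => right
  | fuel + 1, left, right =>
    if left ≤ right then
      let mid := PySem.Int.floordiv (left + right) 2
      if val < PySem.List.pyGetD S mid 0 then
        next_station_search_go S val fuel left (mid - 1)
      else
        next_station_search_go S val fuel (mid + 1) right
    else right

def next_station_search (S : List Int) (left right val : Int) : Int :=
  next_station_search_go S val (right + 1 - left).toNat left right

-- A's while-loop (position/counter); fuel = lastStation - position, which shrinks at every jump
def min_refuels_go (S : List Int) (L destination last : Int) : Nat → Int → Int → Int
  | 0, _, counter =>
    if destination - PySem.List.pyGetD S last 0 ≤ L then counter else -1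
  | fuel + 1, pos, counter =>
    if pos < last then
      let nextStop := next_station_search S (pos + 1) last (PySem.List.pyGetD S pos 0 + L)
      if nextStop = pos then -1
      else min_refuels_go S L destination last fuel nextStop (counter + 1)
    else if destination - PySem.List.pyGetD S last 0 ≤ L then counter else -1

def min_refuels (stations : List Int) (L : Int) (destination : Int) (fuel : Int) : Int :=
  let n : Int := stations.length
  let firstStation := next_station_search stations 0 (n - 1) fuel
  let lastStation := next_station_search stations 0 (n - 1) destination
  if PySem.List.pyGetD stations 0 0 > fuel then -1
  else if fuel ≥ destination then 0
  else min_refuels_go stations L destination lastStation (lastStation - firstStation).toNat firstStation 0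

-- ===== PORT B =====
-- B's forward scan: advance j while j+1 <= last and stations[j+1] <= v; fuel = last - j
def scan_up_go (S : List Int) (last v : Int) : Nat → Int → Int
  | 0, j => j
  | fuel + 1, j =>
    if j + 1 ≤ last ∧ PySem.List.pyGetD S (j + 1) 0 ≤ v then
      scan_up_go S last v fuel (j + 1)
    else j

def scan_up (S : List Int) (last v j : Int) : Int :=
  scan_up_go S last v (last - j).toNat j

-- B's downward scan for the last station ≤ destination; fuel = last + 1
def scan_down_go (S : List Int) (destination : Int) : Nat → Int → Int
  | 0, last => last
  | fuel + 1, last =>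
    if 0 ≤ last ∧ destination < PySem.List.pyGetD S last 0 then
      scan_down_go S destination fuel (last - 1)
    else last

def scan_down (S : List Int) (destination last : Int) : Int :=
  scan_down_go S destination (last + 1).toNat last

-- B's main greedy loop: one linear pass, i advances to the farthest reachable station; fuel = last - i
def min_refuels_alt_go (S : List Int) (L last : Int) : Nat → Int → Int → Int
  | 0, _, count => count
  | fuel + 1, i, count =>
    if i < last then
      let j := scan_up S last (PySem.List.pyGetD S i 0 + L) i
      if j = i then -1
      else min_refuels_alt_go S L last fuel j (count + 1)
    else count

def min_refuels_alt (stations : List Int) (L : Int) (destination : Int) (fuel : Int) : Int :=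
  if PySem.List.pyGetD stations 0 0 > fuel then -1
  else if fuel ≥ destination then 0
  else
    let n : Int := stations.length
    let last := scan_down stations destination (n - 1)
    if destination - PySem.List.pyGetD stations last 0 > L then -1
    else
      let i := scan_up stations (n - 1) fuel 0
      min_refuels_alt_go stations L last (last - i).toNat i 0

-- ===== PRECONDITION & SPEC =====
-- Pre_ excludes the empty list, on which A raises IndexError at stations[0], and unsorted
-- station lists (binary search presupposes a sorted list; on unsorted input A's value is an
-- accident of the search paths) — except when a guard clause decides the result before any
-- search runs (stations[0] > fuel, or fuel ≥ destination), where both programs agree anyway.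
def Pre_min_refuels (stations : List Int) (L : Int) (destination : Int) (fuel : Int) : Prop :=
  stations ≠ [] ∧
    (stations.Pairwise (· ≤ ·) ∨ PySem.List.pyGetD stations 0 0 > fuel ∨ fuel ≥ destination)
instance (stations : List Int) (L : Int) (destination : Int) (fuel : Int) : Decidable (Pre_min_refuels stations L destination fuel) := by unfold Pre_min_refuels; infer_instance

def pvWitness_min_refuels : List Int × Int × Int × Int := ([1, 3, 6], 4, 10, 2)

def Spec_min_refuels (stations : List Int) (L : Int) (destination : Int) (fuel : Int) (out : Int) : Prop := out = min_refuels_alt stations L destination fuel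
instance (stations : List Int) (L : Int) (destination : Int) (fuel : Int) (out : Int) : Decidable (Spec_min_refuels stations L destination fuel out) := by unfold Spec_min_refuels; infer_instance

-- ===== CLAIM (what is proved, stated in full; the proofs are below) =====
def Claim_equal_min_refuels : Prop := ∀ (stations : List Int) (L : Int) (destination : Int) (fuel : Int), Dom_min_refuels stations L destination fuel → Pre_min_refuels stations L destination fuel → Spec_min_refuels stations L destination fuel (min_refuels stations L destination fuel)

-- ===== LEMMAS AND PROOFS =====

-- monotonicity of indexing on a sorted list
theorem sorted_mono (S : List Int) (hs : S.Pairwise (· ≤ ·)) (i j : Int)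
    (h0 : 0 ≤ i) (hij : i ≤ j) (hj : j < (S.length : Int)) :
    PySem.List.pyGetD S i 0 ≤ PySem.List.pyGetD S j 0 := by
  rcases eq_or_lt_of_le hij with rfl | hlt
  · exact le_refl _
  · rw [PySem.List.pyGetD_eq_getElem S (0 : Int) h0 (by omega),
        PySem.List.pyGetD_eq_getElem S (0 : Int) (by omega) hj]
    exact List.pairwise_iff_getElem.mp hs i.toNat j.toNat (by omega) (by omega) (by omega)

-- bounds of the binary-search result (fuel-generic)
theorem nss_go_bounds (S : List Int) (val : Int) (fuel : Nat) :
    ∀ left right : Int, left ≤ right + 1 → (right + 1 - left).toNat ≤ fuel →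
      left - 1 ≤ next_station_search_go S val fuel left right ∧
      next_station_search_go S val fuel left right ≤ right := by
  induction fuel with
  | zero => intro left right h hf; simp only [next_station_search_go]; omega
  | succ fuel ih =>
    intro left right h hf
    simp only [next_station_search_go]
    by_cases hlr : left ≤ right
    · rw [if_pos hlr]
      have hb := PySem.Int.floordiv_two_mid_bounds hlr
      by_cases hlt : val < PySem.List.pyGetD S (PySem.Int.floordiv (left + right) 2) 0
      · rw [if_pos hlt]
        have := ih left (PySem.Int.floordiv (left + right) 2 - 1) (by omega) (by omega)
        omega
      · rw [if_neg hlt]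
        have := ih (PySem.Int.floordiv (left + right) 2 + 1) right (by omega) (by omega)
        omega
    · rw [if_neg hlr]; omega

theorem nss_bounds (S : List Int) (left right val : Int) (h : left ≤ right + 1) :
    left - 1 ≤ next_station_search S left right val ∧ next_station_search S left right val ≤ right :=
  nss_go_bounds S val (right + 1 - left).toNat left right h (le_refl _)

-- characterisation of A's binary search: at the answer the value fits, just above it does not
theorem nss_go_char (S : List Int) (val : Int) (fuel : Nat) :
    ∀ left right : Int, left ≤ right + 1 → (right + 1 - left).toNat ≤ fuel →
      (left ≤ next_station_search_go S val fuel left right →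
          PySem.List.pyGetD S (next_station_search_go S val fuel left right) 0 ≤ val) ∧
      (next_station_search_go S val fuel left right < right →
          val < PySem.List.pyGetD S (next_station_search_go S val fuel left right + 1) 0) := by
  induction fuel with
  | zero =>
    intro left right h hf
    simp only [next_station_search_go]
    exact ⟨fun hle => absurd hle (by omega), fun hlt => absurd hlt (by omega)⟩
  | succ fuel ih =>
    intro left right h hf
    simp only [next_station_search_go]
    by_cases hlr : left ≤ right
    · rw [if_pos hlr]
      set mid := PySem.Int.floordiv (left + right) 2 with hmid
      have hb := PySem.Int.floordiv_two_mid_bounds hlr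
      by_cases hlt : val < PySem.List.pyGetD S mid 0
      · rw [if_pos hlt]
        have hbnd := nss_go_bounds S val fuel left (mid - 1) (by omega) (by omega)
        have ihc := ih left (mid - 1) (by omega) (by omega)
        refine ⟨fun hle => ihc.1 hle, fun hlt2 => ?_⟩
        rcases lt_or_ge (next_station_search_go S val fuel left (mid - 1)) (mid - 1) with hc | hc
        · exact ihc.2 hc
        · have he : next_station_search_go S val fuel left (mid - 1) = mid - 1 := by omega
          rw [he]
          have h2 : mid - 1 + 1 = mid := by omega
          rw [h2]; exact hlt
      · rw [if_neg hlt]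
        have hbnd := nss_go_bounds S val fuel (mid + 1) right (by omega) (by omega)
        have ihc := ih (mid + 1) right (by omega) (by omega)
        refine ⟨fun hle => ?_, fun hlt2 => ihc.2 hlt2⟩
        rcases lt_or_ge (next_station_search_go S val fuel (mid + 1) right) (mid + 1) with hc | hc
        · have he : next_station_search_go S val fuel (mid + 1) right = mid := by omega
          rw [he]
          omega
        · exact ihc.1 hc
    · rw [if_neg hlr]
      exact ⟨fun hle => absurd hle (by omega), fun hlt2 => absurd hlt2 (by omega)⟩

theorem nss_char (S : List Int) (left right val : Int) (h : left ≤ right + 1) :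
    (left ≤ next_station_search S left right val →
        PySem.List.pyGetD S (next_station_search S left right val) 0 ≤ val) ∧
    (next_station_search S left right val < right →
        val < PySem.List.pyGetD S (next_station_search S left right val + 1) 0) :=
  nss_go_char S val (right + 1 - left).toNat left right h (le_refl _)

-- on a sorted list the characterisation pins the index uniquely
theorem char_unique (S : List Int) (hs : S.Pairwise (· ≤ ·)) (left right val q1 q2 : Int)
    (h0 : 0 ≤ left) (hr : right ≤ (S.length : Int) - 1)
    (hb1 : left - 1 ≤ q1 ∧ q1 ≤ right)
    (hc1 : (left ≤ q1 → PySem.List.pyGetD S q1 0 ≤ val) ∧ (q1 < right → val < PySem.List.pyGetD S (q1 + 1) 0))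
    (hb2 : left - 1 ≤ q2 ∧ q2 ≤ right)
    (hc2 : (left ≤ q2 → PySem.List.pyGetD S q2 0 ≤ val) ∧ (q2 < right → val < PySem.List.pyGetD S (q2 + 1) 0)) :
    q1 = q2 := by
  by_contra hne
  rcases lt_or_gt_of_ne hne with hlt | hlt
  · have h1 := hc1.2 (by omega)
    have h2 := hc2.1 (by omega)
    have := sorted_mono S hs (q1 + 1) q2 (by omega) (by omega) (by omega)
    omega
  · have h1 := hc2.2 (by omega)
    have h2 := hc1.1 (by omega)
    have := sorted_mono S hs (q2 + 1) q1 (by omega) (by omega) (by omega)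
    omega

-- bounds and characterisation of B's forward scan
theorem scan_up_go_bounds (S : List Int) (last v : Int) (fuel : Nat) :
    ∀ j : Int, j ≤ scan_up_go S last v fuel j ∧ scan_up_go S last v fuel j ≤ max j last := by
  induction fuel with
  | zero => intro j; simp only [scan_up_go]; omega
  | succ fuel ih =>
    intro j
    simp only [scan_up_go]
    by_cases hc : j + 1 ≤ last ∧ PySem.List.pyGetD S (j + 1) 0 ≤ v
    · rw [if_pos hc]
      have := ih (j + 1)
      omega
    · rw [if_neg hc]; omega

theorem scan_up_bounds (S : List Int) (last v j : Int) :
    j ≤ scan_up S last v j ∧ scan_up S last v j ≤ max j last :=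
  scan_up_go_bounds S last v (last - j).toNat j

theorem scan_up_go_char (S : List Int) (last v : Int) (fuel : Nat) :
    ∀ j : Int, (last - j).toNat ≤ fuel →
      (j + 1 ≤ scan_up_go S last v fuel j → PySem.List.pyGetD S (scan_up_go S last v fuel j) 0 ≤ v) ∧
      (scan_up_go S last v fuel j < last → v < PySem.List.pyGetD S (scan_up_go S last v fuel j + 1) 0) := by
  induction fuel with
  | zero =>
    intro j hf
    simp only [scan_up_go]
    exact ⟨fun hle => absurd hle (by omega), fun hlt => absurd hlt (by omega)⟩
  | succ fuel ih =>
    intro j hf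
    simp only [scan_up_go]
    by_cases hc : j + 1 ≤ last ∧ PySem.List.pyGetD S (j + 1) 0 ≤ v
    · rw [if_pos hc]
      have hb := scan_up_go_bounds S last v fuel (j + 1)
      have ihc := ih (j + 1) (by omega)
      refine ⟨fun hle => ?_, ihc.2⟩
      rcases lt_or_ge (j + 1) (scan_up_go S last v fuel (j + 1)) with hcase | hcase
      · exact ihc.1 (by omega)
      · have he : scan_up_go S last v fuel (j + 1) = j + 1 := by omega
        rw [he]; exact hc.2
    · rw [if_neg hc]
      refine ⟨fun hle => absurd hle (by omega), fun hlt => ?_⟩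
      rcases not_and_or.mp hc with h' | h'
      · exact absurd (by omega) h'
      · omega

theorem scan_up_char (S : List Int) (last v j : Int) :
    (j + 1 ≤ scan_up S last v j → PySem.List.pyGetD S (scan_up S last v j) 0 ≤ v) ∧
    (scan_up S last v j < last → v < PySem.List.pyGetD S (scan_up S last v j + 1) 0) :=
  scan_up_go_char S last v (last - j).toNat j (le_refl _)

-- bounds and characterisation of B's downward scan
theorem scan_down_go_bounds (S : List Int) (destination : Int) (fuel : Nat) :
    ∀ last : Int, -1 ≤ last → (last + 1).toNat ≤ fuel →
      -1 ≤ scan_down_go S destination fuel last ∧ scan_down_go S destination fuel last ≤ last := by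
  induction fuel with
  | zero => intro last hm hf; simp only [scan_down_go]; omega
  | succ fuel ih =>
    intro last hm hf
    simp only [scan_down_go]
    by_cases hc : 0 ≤ last ∧ destination < PySem.List.pyGetD S last 0
    · rw [if_pos hc]
      have := ih (last - 1) (by omega) (by omega)
      omega
    · rw [if_neg hc]; omega

theorem scan_down_go_char (S : List Int) (destination : Int) (fuel : Nat) :
    ∀ last : Int, -1 ≤ last → (last + 1).toNat ≤ fuel →
      (0 ≤ scan_down_go S destination fuel last → PySem.List.pyGetD S (scan_down_go S destination fuel last) 0 ≤ destination) ∧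
      (scan_down_go S destination fuel last < last → destination < PySem.List.pyGetD S (scan_down_go S destination fuel last + 1) 0) := by
  induction fuel with
  | zero =>
    intro last hm hf
    simp only [scan_down_go]
    exact ⟨fun h0 => absurd h0 (by omega), fun hlt => absurd hlt (by omega)⟩
  | succ fuel ih =>
    intro last hm hf
    simp only [scan_down_go]
    by_cases hc : 0 ≤ last ∧ destination < PySem.List.pyGetD S last 0
    · rw [if_pos hc]
      have hb := scan_down_go_bounds S destination fuel (last - 1) (by omega) (by omega)
      have ihc := ih (last - 1) (by omega) (by omega)
      refine ⟨ihc.1, fun hlt => ?_⟩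
      rcases lt_or_ge (scan_down_go S destination fuel (last - 1)) (last - 1) with hcase | hcase
      · exact ihc.2 hcase
      · have he : scan_down_go S destination fuel (last - 1) = last - 1 := by omega
        rw [he]
        have h2 : last - 1 + 1 = last := by omega
        rw [h2]; exact hc.2
    · rw [if_neg hc]
      refine ⟨fun h0 => ?_, fun hlt => absurd hlt (by omega)⟩
      rcases not_and_or.mp hc with h' | h'
      · exact absurd h0 h'
      · omega

theorem scan_down_bounds (S : List Int) (destination last : Int) (h : -1 ≤ last) :
    -1 ≤ scan_down S destination last ∧ scan_down S destination last ≤ last :=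
  scan_down_go_bounds S destination (last + 1).toNat last h (le_refl _)

theorem scan_down_char (S : List Int) (destination last : Int) (h : -1 ≤ last) :
    (0 ≤ scan_down S destination last → PySem.List.pyGetD S (scan_down S destination last) 0 ≤ destination) ∧
    (scan_down S destination last < last → destination < PySem.List.pyGetD S (scan_down S destination last + 1) 0) :=
  scan_down_go_char S destination (last + 1).toNat last h (le_refl _)

-- A's loop returns -1 when the destination is out of range of the last station, regardless of the path
theorem loopA_far (S : List Int) (L destination last : Int)
    (hfar : ¬ destination - PySem.List.pyGetD S last 0 ≤ L) (fuel : Nat) :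
    ∀ pos counter, min_refuels_go S L destination last fuel pos counter = -1 := by
  induction fuel with
  | zero => intro pos counter; simp only [min_refuels_go]; rw [if_neg hfar]
  | succ fuel ih =>
    intro pos counter
    simp only [min_refuels_go]
    by_cases h : pos < last
    · rw [if_pos h]
      by_cases hst : next_station_search S (pos + 1) last (PySem.List.pyGetD S pos 0 + L) = pos
      · rw [if_pos hst]
      · rw [if_neg hst]; exact ih _ _
    · rw [if_neg h, if_neg hfar]

-- the two greedy loops agree step by step on a sorted list
theorem loop_eq (S : List Int) (hs : S.Pairwise (· ≤ ·)) (L destination last : Int)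
    (hlast : last ≤ (S.length : Int) - 1)
    (hnear : destination - PySem.List.pyGetD S last 0 ≤ L) (fuel : Nat) :
    ∀ pos counter, 0 ≤ pos → (last - pos).toNat ≤ fuel →
      min_refuels_go S L destination last fuel pos counter =
        min_refuels_alt_go S L last fuel pos counter := by
  induction fuel with
  | zero =>
    intro pos counter hpos hf
    simp only [min_refuels_go, min_refuels_alt_go]
    rw [if_pos hnear]
  | succ fuel ih =>
    intro pos counter hpos hf
    simp only [min_refuels_go, min_refuels_alt_go]
    by_cases h : pos < last
    · rw [if_pos h, if_pos h]
      have hbB := scan_up_bounds S last (PySem.List.pyGetD S pos 0 + L) pos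
      have hcB := scan_up_char S last (PySem.List.pyGetD S pos 0 + L) pos
      have hbA := nss_bounds S (pos + 1) last (PySem.List.pyGetD S pos 0 + L) (by omega)
      have hcA := nss_char S (pos + 1) last (PySem.List.pyGetD S pos 0 + L) (by omega)
      have heq : next_station_search S (pos + 1) last (PySem.List.pyGetD S pos 0 + L)
          = scan_up S last (PySem.List.pyGetD S pos 0 + L) pos :=
        char_unique S hs (pos + 1) last (PySem.List.pyGetD S pos 0 + L) _ _
          (by omega) hlast ⟨by omega, by omega⟩ hcA ⟨by omega, by omega⟩ hcB
      rw [← heq]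
      by_cases hst : next_station_search S (pos + 1) last (PySem.List.pyGetD S pos 0 + L) = pos
      · rw [if_pos hst, if_pos hst]
      · rw [if_neg hst, if_neg hst]
        exact ih _ _ (by omega) (by omega)
    · rw [if_neg h, if_neg h, if_pos hnear]

-- ===== VERDICT (by name: the statement is the Claim_ definition above) =====
theorem min_refuels_spec : Claim_equal_min_refuels := by
  intro stations L destination fuel _hdom hpre
  obtain ⟨hne, hpre⟩ := hpre
  unfold Spec_min_refuels min_refuels min_refuels_alt
  have hn : 1 ≤ (stations.length : Int) := by
    have : stations.length ≠ 0 := fun h => hne (List.eq_nil_of_length_eq_zero h)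
    omega
  by_cases h1 : PySem.List.pyGetD stations 0 0 > fuel
  · simp only [if_pos h1]
  · simp only [if_neg h1]
    by_cases h2 : fuel ≥ destination
    · simp only [if_pos h2]
    · simp only [if_neg h2]
      -- both guards are off, so Pre_ leaves only the sorted case
      have hs : stations.Pairwise (· ≤ ·) := by tauto
      replace h1 := not_lt.mp h1
      replace h2 := not_le.mp h2
      set n : Int := (stations.length : Int) with hn_def
      -- last station: B's downward scan equals A's binary search
      have hbL := scan_down_bounds stations destination (n - 1) (by omega)
      have hcL := scan_down_char stations destination (n - 1) (by omega)
      have hbL' := nss_bounds stations 0 (n - 1) destination (by omega)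
      have hcL' := nss_char stations 0 (n - 1) destination (by omega)
      -- the downward scan cannot end at -1: stations[0] ≤ fuel < destination
      have hLpos : 0 ≤ scan_down stations destination (n - 1) := by
        by_contra hneg
        have hlt : scan_down stations destination (n - 1) < n - 1 := by omega
        have := hcL.2 hlt
        have he : scan_down stations destination (n - 1) + 1 = 0 := by omega
        rw [he] at this
        omega
      have hlast_eq : next_station_search stations 0 (n - 1) destination
          = scan_down stations destination (n - 1) :=
        char_unique stations hs 0 (n - 1) destination _ _
          (by omega) (by omega) ⟨by omega, by omega⟩ hcL'
          ⟨by omega, by omega⟩ ⟨fun _ => hcL.1 hLpos, hcL.2⟩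
      -- first station: B's forward scan equals A's binary search
      have hbF := scan_up_bounds stations (n - 1) fuel 0
      have hcF := scan_up_char stations (n - 1) fuel 0
      have hbF' := nss_bounds stations 0 (n - 1) fuel (by omega)
      have hcF' := nss_char stations 0 (n - 1) fuel (by omega)
      have hcF0 : (0 ≤ scan_up stations (n - 1) fuel 0 →
          PySem.List.pyGetD stations (scan_up stations (n - 1) fuel 0) 0 ≤ fuel) := by
        intro _
        rcases lt_or_ge 0 (scan_up stations (n - 1) fuel 0) with hc | hc
        · exact hcF.1 (by omega)
        · have he : scan_up stations (n - 1) fuel 0 = 0 := by omega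
          rw [he]; exact h1
      have hfirst_eq : next_station_search stations 0 (n - 1) fuel
          = scan_up stations (n - 1) fuel 0 :=
        char_unique stations hs 0 (n - 1) fuel _ _
          (by omega) (by omega) ⟨by omega, by omega⟩ hcF'
          ⟨by omega, by omega⟩ ⟨hcF0, hcF.2⟩
      -- the first station is a real index: stations[0] ≤ fuel
      have hFpos : 0 ≤ next_station_search stations 0 (n - 1) fuel := by
        by_contra hneg
        have hlt : next_station_search stations 0 (n - 1) fuel < n - 1 := by omega
        have := hcF'.2 hlt
        have he : next_station_search stations 0 (n - 1) fuel + 1 = 0 := by omega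
        rw [he] at this
        omega
      rw [hlast_eq, hfirst_eq]
      by_cases hfar : destination - PySem.List.pyGetD stations (scan_down stations destination (n - 1)) 0 > L
      · rw [if_pos hfar]
        exact loopA_far stations L destination _ (by omega) _ _ 0
      · rw [if_neg hfar]
        exact loop_eq stations hs L destination _ (by omega) (by omega) _ _ 0 (by omega) (le_refl _)
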